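-- pv_equiv track=rewrite | github.com/andylws/SNU_Lecture_Computing-for-Data-Science | PROJ3/P3.py | P3
-- ===== SOURCE A (Python) =====
-- def P3(A, B):
--     '''
--     A, B: list
--     '''
--     length = len(A)
--
--     for i in range(length):
--         sub_sum_A = 0
--         sub_sum_B = 0
--         sub_list_A = []
--         sub_list_B = []
--         for j in range(i + 1):
--             sub_list_A = A[j: length - i + j]
--             sub_list_B = B[j: length - i + j]
--             sub_sum_A = sum(sub_list_A)
--             sub_sum_B = sum(sub_list_B)
--             if sub_sum_A == sub_sum_B:
--                 return len(sub_list_A)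
--             else:
--                 continue
--
--     return 0
-- ===== SOURCE B (Python) =====
-- def P3(A, B):
--     # Longest window [j, j+L) (within len(A)) where sum(A[j:j+L]) == sum(B[j:j+L])
--     # (B truncated/zero-padded to len(A), matching slice semantics).
--     # One pass: prefix sums of the difference + first-occurrence hash map.
--     n = len(A)
--     first = {0: 0}
--     s = 0
--     best = 0
--     for k in range(n):
--         s += A[k] - (B[k] if k < len(B) else 0)
--         if s in first:
--             best = max(best, k + 1 - first[s])
--         else:
--             first[s] = k + 1
--     return best
-- ===== Notes on version B (the rewrite author's own statement) =====
-- stated objective: faster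
-- what changed: Replaced the triple loop (all windows by decreasing length, each summed from scratch) by a single pass maintaining the running prefix sum of A[k]-B[k] and a hash map of each prefix value's first occurrence; the answer is the longest zero-sum stretch of the difference.
import Mathlib
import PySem

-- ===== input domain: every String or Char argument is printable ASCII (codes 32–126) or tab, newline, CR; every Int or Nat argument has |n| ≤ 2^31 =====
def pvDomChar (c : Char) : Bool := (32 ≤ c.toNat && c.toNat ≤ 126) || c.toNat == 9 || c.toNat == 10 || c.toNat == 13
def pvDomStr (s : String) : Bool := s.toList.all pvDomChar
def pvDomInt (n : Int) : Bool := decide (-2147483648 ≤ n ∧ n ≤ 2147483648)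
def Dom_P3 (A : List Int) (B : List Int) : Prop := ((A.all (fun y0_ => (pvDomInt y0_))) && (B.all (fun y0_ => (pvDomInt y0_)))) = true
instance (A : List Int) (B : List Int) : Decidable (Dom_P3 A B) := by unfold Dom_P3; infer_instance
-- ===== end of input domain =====

-- B replaces A's O(n^3) scan of all windows by one pass over prefix sums of the
-- element-wise difference with a first-occurrence hash map (longest zero-sum stretch).

-- ===== PORT A =====
-- inner 'for j in range(i + 1)' loop with early return
def P3_inner (A : List Int) (B : List Int) (n : Nat) (i : Nat) : List Nat → Option Int
  | [] => none
  | j :: js =>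
      let subA := PySem.List.slice A (some (j : Int)) (some ((n : Int) - (i : Int) + (j : Int)))
      let subB := PySem.List.slice B (some (j : Int)) (some ((n : Int) - (i : Int) + (j : Int)))
      if subA.sum = subB.sum then some ((subA.length : Int))
      else P3_inner A B n i js

-- outer 'for i in range(length)' loop; falls through to 'return 0'
def P3_outer (A : List Int) (B : List Int) (n : Nat) : List Nat → Int
  | [] => 0
  | i :: is =>
      match P3_inner A B n i (List.range (i + 1)) with
      | some v => v
      | none => P3_outer A B n is

def P3 (A : List Int) (B : List Int) : Int :=
  P3_outer A B A.length (List.range A.length)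

-- ===== PORT B =====
-- one step of the 'for k in range(n)' loop; state = (first, s, best)
def P3_altStep (A : List Int) (B : List Int) (st : PySem.Dict Int Int × Int × Int) (k : Nat) :
    PySem.Dict Int Int × Int × Int :=
  let s := st.2.1 + A.getD k 0 - (if k < B.length then B.getD k 0 else 0)
  match st.1.get? s with
  | some p => (st.1, s, max st.2.2 ((k : Int) + 1 - p))
  | none => (st.1.insert s ((k : Int) + 1), s, st.2.2)

def P3_alt (A : List Int) (B : List Int) : Int :=
  ((List.range A.length).foldl (P3_altStep A B) (PySem.Dict.ofList [((0 : Int), (0 : Int))], 0, 0)).2.2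

-- ===== PRECONDITION & SPEC =====
def Spec_P3 (A : List Int) (B : List Int) (out : Int) : Prop := out = P3_alt A B
instance (A : List Int) (B : List Int) (out : Int) : Decidable (Spec_P3 A B out) := by unfold Spec_P3; infer_instance

-- ===== CLAIM (what is proved, stated in full; the proofs are below) =====
def Claim_equal_P3 : Prop := ∀ (A : List Int) (B : List Int), Dom_P3 A B → Spec_P3 A B (P3 A B)

-- ===== LEMMAS AND PROOFS =====

-- prefix sum of the (zero-padded) difference A - B
def Pfun (A : List Int) (B : List Int) (m : Nat) : Int :=
  ∑ k ∈ Finset.range m, (A.getD k 0 - B.getD k 0)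

-- "some window of length L within the first b positions has equal A/B sums"
def QB (A : List Int) (B : List Int) (b : Nat) (L : Nat) : Bool :=
  (List.range (b + 1)).any (fun j => decide (j + L ≤ b) && decide (Pfun A B (j + L) = Pfun A B j))

lemma QB_iff (A B : List Int) (b L : Nat) :
    QB A B b L = true ↔ ∃ j, j + L ≤ b ∧ Pfun A B (j + L) = Pfun A B j := by
  simp only [QB, List.any_eq_true, List.mem_range, Bool.and_eq_true, decide_eq_true_eq]
  constructor
  · rintro ⟨j, _, hle, he⟩; exact ⟨j, hle, he⟩
  · rintro ⟨j, hle, he⟩; exact ⟨j, by omega, hle, he⟩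

def Gfun (A : List Int) (B : List Int) (b : Nat) (c : Nat) : Nat :=
  Nat.findGreatest (fun L => QB A B b L = true) c

lemma sum_take (xs : List Int) (m : Nat) :
    (xs.take m).sum = ∑ k ∈ Finset.range m, xs.getD k 0 := by
  induction m with
  | zero => simp
  | succ m ih =>
    rw [Finset.sum_range_succ, ← ih, List.take_add_one, List.sum_append]
    by_cases h : m < xs.length
    · simp [List.getElem?_eq_getElem h]
    · have hn : xs[m]? = none := List.getElem?_eq_none (by omega)
      simp [hn]

lemma slice_sum (xs : List Int) (a b : Nat) (hab : a ≤ b) :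
    (PySem.List.slice xs (some (a : Int)) (some (b : Int))).sum
      = (∑ k ∈ Finset.range b, xs.getD k 0) - ∑ k ∈ Finset.range a, xs.getD k 0 := by
  rw [PySem.List.slice_natCast, ← sum_take, ← sum_take]
  have h : xs.take b = xs.take a ++ (xs.drop a).take (b - a) := by
    rw [← List.take_add]; congr 1; omega
  rw [h, List.sum_append]; ring

lemma inner_char (A B : List Int) (i : Nat) (hi : i < A.length) (js : List Nat)
    (hjs : ∀ j ∈ js, j ≤ i) :
    P3_inner A B A.length i js
      = if ∃ j ∈ js, Pfun A B (j + (A.length - i)) = Pfun A B j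
        then some ((A.length - i : Nat) : Int) else none := by
  induction js with
  | nil => simp [P3_inner]
  | cons j js ih =>
    have hj : j ≤ i := hjs j (by simp)
    have hcast : (A.length : Int) - (i : Int) + (j : Int) = ((A.length - i + j : Nat) : Int) := by
      push_cast; omega
    have hPsub : ∀ m, Pfun A B m
        = (∑ k ∈ Finset.range m, A.getD k 0) - ∑ k ∈ Finset.range m, B.getD k 0 := by
      intro m; simp [Pfun, Finset.sum_sub_distrib]
    have hidx : j + (A.length - i) = A.length - i + j := by omega
    have hcond : ((PySem.List.slice A (some (j : Int)) (some ((A.length : Int) - (i : Int) + (j : Int)))).sum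
          = (PySem.List.slice B (some (j : Int)) (some ((A.length : Int) - (i : Int) + (j : Int)))).sum)
        ↔ Pfun A B (j + (A.length - i)) = Pfun A B j := by
      rw [hcast, slice_sum A j _ (by omega), slice_sum B j _ (by omega), hidx, hPsub, hPsub]
      constructor <;> intro h <;> omega
    have hlen : (PySem.List.slice A (some (j : Int)) (some ((A.length : Int) - (i : Int) + (j : Int)))).length
        = A.length - i := by
      rw [hcast, PySem.List.slice_natCast, List.length_take, List.length_drop]; omega
    by_cases hc : Pfun A B (j + (A.length - i)) = Pfun A B j
    · simp only [P3_inner, if_pos (hcond.mpr hc), hlen]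
      rw [if_pos ⟨j, by simp, hc⟩]
    · simp only [P3_inner, if_neg (fun h => hc (hcond.mp h))]
      rw [ih (fun x hx => hjs x (by simp [hx]))]
      by_cases hrest : ∃ x ∈ js, Pfun A B (x + (A.length - i)) = Pfun A B x
      · rw [if_pos hrest, if_pos (by rcases hrest with ⟨x, hx, he⟩; exact ⟨x, by simp [hx], he⟩)]
      · rw [if_neg hrest, if_neg (by rintro ⟨x, hx, he⟩; rcases List.mem_cons.mp hx with rfl | hx'
                                     · exact hc he
                                     · exact hrest ⟨x, hx', he⟩)]

lemma outer_char (A B : List Int) : ∀ (c t : Nat), t + c = A.length →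
    P3_outer A B A.length (List.range' t c) = (Gfun A B A.length c : Int) := by
  intro c
  induction c with
  | zero => intro t ht; simp [P3_outer, Gfun]
  | succ c ih =>
    intro t ht
    have htn : t < A.length := by omega
    have hnt : A.length - t = c + 1 := by omega
    rw [List.range'_succ]
    simp only [P3_outer]
    rw [inner_char A B t htn _ (fun j hj => Nat.lt_succ_iff.mp (List.mem_range.mp hj))]
    have hcond : (∃ j ∈ List.range (t + 1), Pfun A B (j + (A.length - t)) = Pfun A B j)
        ↔ QB A B A.length (c + 1) = true := by
      rw [QB_iff]
      constructor
      · rintro ⟨j, hj, he⟩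
        have := List.mem_range.mp hj
        exact ⟨j, by omega, by rwa [hnt] at he⟩
      · rintro ⟨j, hle, he⟩
        exact ⟨j, List.mem_range.mpr (by omega), by rwa [hnt]⟩
    by_cases hq : QB A B A.length (c + 1) = true
    · rw [if_pos (hcond.mpr hq)]
      unfold Gfun
      rw [Nat.findGreatest_succ, if_pos hq]
      simp [hnt]
    · rw [if_neg (fun h => hq (hcond.mp h))]
      rw [ih (t + 1) (by omega)]
      unfold Gfun
      rw [Nat.findGreatest_succ, if_neg hq]

lemma A_char (A B : List Int) : P3 A B = (Gfun A B A.length A.length : Int) := by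
  rw [P3, List.range_eq_range']
  exact outer_char A B A.length 0 (by omega)

-- first index m ≤ k with Pfun m = v, as the dict stores it
def fr (A : List Int) (B : List Int) (k : Nat) (v : Int) : Option Nat :=
  (List.range (k + 1)).find? (fun m => Pfun A B m == v)

lemma find?_range'_char (p : Nat → Bool) :
    ∀ (c t m : Nat), (List.range' t c).find? p = some m →
      p m = true ∧ t ≤ m ∧ m < t + c ∧ ∀ x, t ≤ x → x < m → p x = false := by
  intro c
  induction c with
  | zero => intro t m h; simp at h
  | succ c ih =>
    intro t m h
    rw [List.range'_succ] at h
    by_cases hp : p t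
    · rw [List.find?_cons_of_pos hp] at h
      cases h
      exact ⟨hp, le_refl _, by omega, fun x hx1 hx2 => absurd hx1 (by omega)⟩
    · rw [List.find?_cons_of_neg (by simpa using hp)] at h
      obtain ⟨h1, h2, h3, h4⟩ := ih (t + 1) m h
      refine ⟨h1, by omega, by omega, fun x hx1 hx2 => ?_⟩
      rcases Nat.eq_or_lt_of_le hx1 with rfl | hx
      · simpa using hp
      · exact h4 x (by omega) hx2

lemma fr_some (A B : List Int) (k : Nat) (v : Int) (m : Nat) (h : fr A B k v = some m) :
    Pfun A B m = v ∧ m ≤ k ∧ ∀ m' < m, Pfun A B m' ≠ v := by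
  rw [fr, List.range_eq_range'] at h
  obtain ⟨h1, _, h3, h4⟩ := find?_range'_char _ _ _ _ h
  refine ⟨by simpa using h1, by omega, fun m' hm' he => ?_⟩
  have := h4 m' (by omega) hm'
  simp [he] at this

lemma fr_none (A B : List Int) (k : Nat) (v : Int) (h : fr A B k v = none) :
    ∀ m ≤ k, Pfun A B m ≠ v := by
  intro m hm he
  have := List.find?_eq_none.mp h m (List.mem_range.mpr (by omega))
  simp [he] at this

lemma fr_succ_of_some (A B : List Int) (k : Nat) (v : Int) (m : Nat) (h : fr A B k v = some m) :
    fr A B (k + 1) v = some m := by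
  rw [fr, List.range_succ, List.find?_append]
  rw [fr] at h
  rw [h]
  rfl

lemma fr_succ_of_none (A B : List Int) (k : Nat) (v : Int) (h : fr A B k v = none) :
    fr A B (k + 1) v = if Pfun A B (k + 1) = v then some (k + 1) else none := by
  rw [fr, List.range_succ, List.find?_append]
  rw [fr] at h
  rw [h]
  by_cases he : Pfun A B (k + 1) = v
  · simp [List.find?, he]
  · simp only [List.find?]
    rw [beq_eq_false_iff_ne.mpr he]
    simpa using he

lemma fg_spec {P : Nat → Prop} [DecidablePred P] {b : Nat} (hz : Nat.findGreatest P b ≠ 0) :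
    P (Nat.findGreatest P b) := by
  have h := hz
  rw [Ne, Nat.findGreatest_eq_zero_iff] at h
  push Not at h
  obtain ⟨m, hm0, hmb, hPm⟩ := h
  exact Nat.findGreatest_spec hmb hPm

lemma Gfun_spec (A B : List Int) (b c : Nat) (hz : Gfun A B b c ≠ 0) :
    QB A B b (Gfun A B b c) = true := fg_spec hz

lemma Gfun_le (A B : List Int) (b c : Nat) : Gfun A B b c ≤ c := Nat.findGreatest_le c

lemma le_Gfun (A B : List Int) (b c m : Nat) (h : m ≤ c) (hq : QB A B b m = true) :
    m ≤ Gfun A B b c := Nat.le_findGreatest h hq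

lemma G_step_some (A B : List Int) (k m0 : Nat) (hm : m0 ≤ k)
    (he : Pfun A B m0 = Pfun A B (k + 1))
    (hmin : ∀ m' < m0, Pfun A B m' ≠ Pfun A B (k + 1)) :
    Gfun A B (k + 1) (k + 1) = max (Gfun A B k k) (k + 1 - m0) := by
  apply Nat.le_antisymm
  · by_cases hz : Gfun A B (k + 1) (k + 1) = 0
    · omega
    · obtain ⟨j, hj, hejj⟩ := (QB_iff _ _ _ _).mp (Gfun_spec _ _ _ _ hz)
      by_cases hcase : j + Gfun A B (k + 1) (k + 1) ≤ k
      · have h1 : Gfun A B (k + 1) (k + 1) ≤ Gfun A B k k :=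
          le_Gfun _ _ _ _ _ (by omega) ((QB_iff _ _ _ _).mpr ⟨j, hcase, hejj⟩)
        omega
      · have hjk : j + Gfun A B (k + 1) (k + 1) = k + 1 := by omega
        rw [hjk] at hejj
        have hm0j : m0 ≤ j := not_lt.mp (fun hlt => hmin j hlt hejj.symm)
        omega
  · apply max_le
    · by_cases hz : Gfun A B k k = 0
      · omega
      · obtain ⟨j, hj, hejj⟩ := (QB_iff _ _ _ _).mp (Gfun_spec _ _ _ _ hz)
        exact le_Gfun _ _ _ _ _ (by have := Gfun_le A B k k; omega)
          ((QB_iff _ _ _ _).mpr ⟨j, by omega, hejj⟩)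
    · refine le_Gfun _ _ _ _ _ (by omega) ((QB_iff _ _ _ _).mpr ⟨m0, by omega, ?_⟩)
      rw [show m0 + (k + 1 - m0) = k + 1 by omega]
      exact he.symm

lemma G_step_none (A B : List Int) (k : Nat)
    (h : ∀ m ≤ k, Pfun A B m ≠ Pfun A B (k + 1)) :
    Gfun A B (k + 1) (k + 1) = Gfun A B k k := by
  apply Nat.le_antisymm
  · by_cases hz : Gfun A B (k + 1) (k + 1) = 0
    · omega
    · obtain ⟨j, hj, hejj⟩ := (QB_iff _ _ _ _).mp (Gfun_spec _ _ _ _ hz)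
      by_cases hcase : j + Gfun A B (k + 1) (k + 1) ≤ k
      · have hg : Gfun A B (k + 1) (k + 1) ≤ k := by omega
        exact le_Gfun _ _ _ _ _ hg ((QB_iff _ _ _ _).mpr ⟨j, hcase, hejj⟩)
      · have hjk : j + Gfun A B (k + 1) (k + 1) = k + 1 := by omega
        rw [hjk] at hejj
        have hj' : j ≤ k := by
          have := Gfun_spec _ _ _ _ hz
          omega
        exact absurd hejj.symm (h j hj')
  · by_cases hz : Gfun A B k k = 0
    · omega
    · obtain ⟨j, hj, hejj⟩ := (QB_iff _ _ _ _).mp (Gfun_spec _ _ _ _ hz)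
      exact le_Gfun _ _ _ _ _ (by have := Gfun_le A B k k; omega)
        ((QB_iff _ _ _ _).mpr ⟨j, by omega, hejj⟩)

def InvP3 (A : List Int) (B : List Int) (k : Nat) (st : PySem.Dict Int Int × Int × Int) : Prop :=
  st.2.1 = Pfun A B k ∧
  (∀ v : Int, st.1.get? v = (fr A B k v).map (fun m => (m : Int))) ∧
  st.2.2 = (Gfun A B k k : Int)

lemma fold_inv (A B : List Int) : ∀ k, k ≤ A.length →
    InvP3 A B k ((List.range k).foldl (P3_altStep A B) (PySem.Dict.ofList [((0 : Int), (0 : Int))], 0, 0)) := by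
  intro k
  induction k with
  | zero =>
    intro _
    refine ⟨by simp [Pfun], ?_, by simp [Gfun]⟩
    intro v
    show (PySem.Dict.empty.insert (0 : Int) (0 : Int)).get? v = _
    rw [PySem.Dict.get?_insert]
    have : fr A B 0 v = if Pfun A B 0 = v then some 0 else none := by
      by_cases he : Pfun A B 0 = v
      · simp [fr, he]
      · rw [fr, show List.range (0 + 1) = [0] from rfl,
          List.find?_cons_of_neg (by simpa using he), if_neg he, List.find?_nil]
    rw [this]
    have h0 : Pfun A B 0 = 0 := by simp [Pfun]
    by_cases hv : v = 0
    · rw [if_pos hv, if_pos (by rw [h0, hv])]; rfl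
    · rw [if_neg hv, if_neg (by rw [h0]; exact fun h => hv h.symm), PySem.Dict.get?_empty]; rfl
  | succ k ih =>
    intro hk
    obtain ⟨hs, hd, hb⟩ := ih (by omega)
    rw [List.range_succ, List.foldl_append, List.foldl_cons, List.foldl_nil]
    set st := (List.range k).foldl (P3_altStep A B) (PySem.Dict.ofList [((0 : Int), (0 : Int))], 0, 0) with hst
    simp only [P3_altStep]
    have hBif : (if k < B.length then B.getD k 0 else 0) = B.getD k 0 := by
      by_cases h : k < B.length
      · rw [if_pos h]
      · rw [if_neg h, List.getD_eq_default _ _ (by omega)]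
    have hs' : st.2.1 + A.getD k 0 - (if k < B.length then B.getD k 0 else 0) = Pfun A B (k + 1) := by
      rw [hBif, hs, Pfun, Pfun, Finset.sum_range_succ]; ring
    rw [hs', hd (Pfun A B (k + 1))]
    cases hfr : fr A B k (Pfun A B (k + 1)) with
    | some m0 =>
      show InvP3 A B (k + 1) (st.1, Pfun A B (k + 1), max st.2.2 ((k : Int) + 1 - ((m0 : Nat) : Int)))
      obtain ⟨hem, hmk, hmin⟩ := fr_some _ _ _ _ _ hfr
      refine ⟨rfl, ?_, ?_⟩
      · intro v
        rw [hd v]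
        cases hfv : fr A B k v with
        | some m => rw [fr_succ_of_some _ _ _ _ _ hfv]
        | none =>
          rw [fr_succ_of_none _ _ _ _ hfv, if_neg ?_]
          intro hev
          rw [hev] at hfr
          rw [hfv] at hfr
          simp at hfr
      · show max st.2.2 ((k : Int) + 1 - (m0 : Int)) = _
        rw [hb, G_step_some A B k m0 hmk hem hmin,
          show ((k : Int) + 1 - (m0 : Int)) = ((k + 1 - m0 : Nat) : Int) by omega,
          Nat.cast_max]
    | none =>
      show InvP3 A B (k + 1) (st.1.insert (Pfun A B (k + 1)) ((k : Int) + 1), Pfun A B (k + 1), st.2.2)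
      have hnone := fr_none _ _ _ _ hfr
      refine ⟨rfl, ?_, ?_⟩
      · intro v
        rw [PySem.Dict.get?_insert]
        by_cases hv : v = Pfun A B (k + 1)
        · rw [if_pos hv, hv, fr_succ_of_none _ _ _ _ hfr, if_pos rfl]; rfl
        · rw [if_neg hv, hd v]
          cases hfv : fr A B k v with
          | some m => rw [fr_succ_of_some _ _ _ _ _ hfv]
          | none => rw [fr_succ_of_none _ _ _ _ hfv, if_neg (fun he => hv he.symm)]
      · show st.2.2 = _
        rw [hb, G_step_none A B k hnone]

lemma B_char (A B : List Int) : P3_alt A B = (Gfun A B A.length A.length : Int) := by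
  exact (fold_inv A B A.length (le_refl _)).2.2

-- ===== VERDICT (by name: the statement is the Claim_ definition above) =====
theorem P3_spec : Claim_equal_P3 := by
  intro A B _
  unfold Spec_P3
  rw [A_char, B_char]
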